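-- pv_equiv track=rewrite | github.com/mdn/kuma | vendor/packages/translate/storage/properties.py | is_line_continuation
-- ===== SOURCE A (Python) =====
-- def is_line_continuation(line):
--     """Determine whether *line* has a line continuation marker.
--
--     .properties files can be terminated with a backslash (\\) indicating
--     that the 'value' continues on the next line.  Continuation is only
--     valid if there are an odd number of backslashses (an even number
--     would result in a set of N/2 slashes not an escape)
--
--     :param line: A properties line
--     :type line: str
--     :return: Does *line* end with a line continuation
--     :rtype: Boolean
--     """
--     pos = -1
--     count = 0
--     if len(line) == 0:
--         return False
--     # Count the slashes from the end of the line. Ensure we don't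
--     # go into infinite loop.
--     while len(line) >= -pos and line[pos:][0] == "\\":
--         pos -= 1
--         count += 1
--     return (count % 2) == 1  # Odd is a line continuation, even is not
-- ===== SOURCE B (Python) =====
-- def is_line_continuation(line):
--     # Single forward pass with a boolean parity accumulator: a backslash
--     # toggles the flag, any other character resets it to False.  At the end
--     # the flag is True iff the line ends in an odd run of backslashes.
--     cont = False
--     for ch in line:
--         cont = (not cont) if ch == "\\" else False
--     return cont
-- ===== Notes on version B (the rewrite author's own statement) =====
-- stated objective: alternative
-- what changed: Replaces A's backward while-loop that counts trailing backslashes via quadratic slicing (and its empty-string guard) by a single forward pass over the characters maintaining a boolean parity flag: a backslash toggles it, anything else resets it; no count, no slicing, no guard.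
import Mathlib
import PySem

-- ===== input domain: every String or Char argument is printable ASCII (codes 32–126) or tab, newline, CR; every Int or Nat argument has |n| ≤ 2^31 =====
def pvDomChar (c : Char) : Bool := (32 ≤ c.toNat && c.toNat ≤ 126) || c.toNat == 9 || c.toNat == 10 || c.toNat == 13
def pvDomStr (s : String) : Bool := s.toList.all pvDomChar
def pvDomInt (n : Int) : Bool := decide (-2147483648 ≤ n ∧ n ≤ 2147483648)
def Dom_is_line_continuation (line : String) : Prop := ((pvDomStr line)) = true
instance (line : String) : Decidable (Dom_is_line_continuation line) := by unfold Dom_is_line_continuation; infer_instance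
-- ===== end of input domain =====

-- B replaces A's backward trailing-backslash count (with quadratic slicing) by a single
-- forward pass holding a boolean parity flag (alternative decomposition, no count at all).

-- ===== PORT A =====
-- while len(line) >= -pos and line[pos:][0] == "\\": pos -= 1; count += 1
def pvLoopA (cs : List Char) (pos count : Int) : Int :=
  if h : -pos ≤ (cs.length : Int) ∧
         PySem.List.pyGet? (PySem.List.slice cs (some pos) none) 0 = some '\\' then
    pvLoopA cs (pos - 1) (count + 1)
  else count
termination_by ((cs.length : Int) + pos + 1).toNat
decreasing_by
  have := h.1; omega

def is_line_continuation (line : String) : Bool :=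
  let cs := line.toList
  if cs.length = 0 then false
  else decide (PySem.Int.mod (pvLoopA cs (-1) 0) 2 = 1)

-- ===== PORT B =====
-- for ch in line: cont = (not cont) if ch == "\\" else False
def is_line_continuation_alt (line : String) : Bool :=
  line.toList.foldl (fun cont ch => if ch == '\\' then !cont else false) false

-- ===== PRECONDITION & SPEC =====
def Spec_is_line_continuation (line : String) (out : Bool) : Prop := out = is_line_continuation_alt line
instance (line : String) (out : Bool) : Decidable (Spec_is_line_continuation line out) := by unfold Spec_is_line_continuation; infer_instance

-- ===== CLAIM (what is proved, stated in full; the proofs are below) =====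
def Claim_equal_is_line_continuation : Prop := ∀ (line : String), Dom_is_line_continuation line → Spec_is_line_continuation line (is_line_continuation line)

-- ===== LEMMAS AND PROOFS =====

-- A's loop counts the trailing backslashes: at position -(k+1) with accumulator c it
-- returns c plus the backslash-run length of cs.reverse.drop k.
lemma pvLoopA_eq (cs : List Char) (k : Nat) (c : Int) :
    pvLoopA cs (-((k : Int) + 1)) c
      = c + (((cs.reverse.drop k).takeWhile (· == '\\')).length : Int) := by
  induction hn : cs.length - k generalizing k c with
  | zero =>
    have hk : cs.length ≤ k := by omega
    rw [pvLoopA, dif_neg]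
    · rw [List.drop_eq_nil_of_le (by simpa using hk)]; simp
    · rintro ⟨h1, -⟩; omega
  | succ n ih =>
    have hk : k < cs.length := by omega
    have hslice : PySem.List.slice cs (some (-((k : Int) + 1))) none
        = cs.drop (cs.length - (k+1)) := by
      have := PySem.List.slice_from_neg_natCast cs (k+1) (by omega)
      push_cast at this ⊢
      convert this using 3 <;> push_cast <;> ring
    have hidx : cs.length - (k+1) < cs.length := by omega
    have hget : PySem.List.pyGet? (PySem.List.slice cs (some (-((k : Int) + 1))) none) 0
        = some cs[cs.length - (k+1)] := by
      rw [hslice, PySem.List.pyGet?_zero]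
      simp [hidx]
    have hrevk : k < cs.reverse.length := by simpa using hk
    have hreq : cs.reverse[k] = cs[cs.length - (k+1)] := by
      rw [List.getElem_reverse]; congr 1; omega
    have hdropcons : cs.reverse.drop k = cs.reverse[k] :: cs.reverse.drop (k+1) :=
      List.drop_eq_getElem_cons hrevk
    by_cases hbs : cs[cs.length - (k+1)] = '\\'
    · rw [pvLoopA, dif_pos ⟨by push_cast; omega, by rw [hget, hbs]⟩]
      have harg : -((k : Int) + 1) - 1 = -(((k+1 : Nat) : Int) + 1) := by push_cast; ring
      rw [harg, ih (k+1) (c+1) (by omega)]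
      rw [hdropcons, hreq, hbs]
      simp
      push_cast; ring
    · rw [pvLoopA, dif_neg]
      · rw [hdropcons, hreq]
        simp [hbs]
      · rintro ⟨-, h2⟩
        rw [hget] at h2
        exact hbs (by simpa using h2)

-- B's forward fold computes the parity of the trailing backslash run.
lemma foldB_eq (cs : List Char) :
    cs.foldl (fun cont ch => if ch == '\\' then !cont else false) false
      = decide ((cs.reverse.takeWhile (· == '\\')).length % 2 = 1) := by
  induction cs using List.reverseRecOn with
  | nil => simp
  | append_singleton l c ih =>
    rw [List.foldl_append, List.foldl_cons, List.foldl_nil, ih]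
    by_cases hc : c = '\\'
    · subst hc
      simp only [List.reverse_append, List.reverse_cons, List.reverse_nil,
        List.nil_append, List.cons_append, List.takeWhile_cons, beq_self_eq_true,
        if_true, List.length_cons]
      set n := ((l.reverse.takeWhile (· == '\\')).length) with hn
      by_cases hp : n % 2 = 1
      · simp [hp]; omega
      · simp [hp]; omega
    · simp [List.takeWhile_cons, hc]

-- ===== VERDICT (by name: the statement is the Claim_ definition above) =====
theorem is_line_continuation_spec : Claim_equal_is_line_continuation := by
  intro line _
  unfold Spec_is_line_continuation is_line_continuation is_line_continuation_alt
  set cs := line.toList with hcs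
  rw [foldB_eq]
  by_cases h0 : cs.length = 0
  · have h : cs = [] := List.eq_nil_of_length_eq_zero h0
    simp [h]
  · rw [if_neg h0]
    have hA := pvLoopA_eq cs 0 0
    norm_num at hA
    rw [hA, decide_eq_decide]
    rw [PySem.Int.mod_eq_emod_of_pos (by norm_num)]
    omega
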